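-- pv_equiv track=rewrite | github.com/DelmedigoA/FineTree | src/finetree_annotator/finetune/push_dataset_hub.py | _remove_numeric_thousands_separators
-- ===== SOURCE A (Python) =====
-- def _remove_numeric_thousands_separators(value: str) -> str:
--     stripped = value.strip()
--     if "," not in stripped:
--         return value
--
--     accounting_negative = stripped.startswith("(") and stripped.endswith(")")
--     if ("(" in stripped or ")" in stripped) and not accounting_negative:
--         return value
--
--     core = stripped[1:-1] if accounting_negative else stripped
--     if not core:
--         return value
--
--     sign = ""
--     if core[0] in {"+", "-"}:
--         sign = core[0]
--         core = core[1:]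
--     if not core:
--         return value
--
--     if core.count(".") > 1:
--         return value
--     int_part, dot, frac_part = core.partition(".")
--     if not int_part:
--         return value
--
--     groups = int_part.split(",")
--     if len(groups) <= 1:
--         return value
--     if not groups[0].isdigit() or len(groups[0]) > 3:
--         return value
--     if any((not g.isdigit() or len(g) != 3) for g in groups[1:]):
--         return value
--
--     normalized = sign + "".join(groups) + (dot + frac_part if dot else "")
--     return f"({normalized})" if accounting_negative else normalized
-- ===== SOURCE B (Python) =====
-- def _scan_grouped(int_part: str) -> "str | None":
--     n = len(int_part)
--     if n < 5 or n % 4 == 0: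
--         return None
--     rev = []
--     for i, ch in enumerate(reversed(int_part)):
--         if i % 4 == 3:
--             if ch != ",":
--                 return None
--         elif ch.isdigit():
--             rev.append(ch)
--         else:
--             return None
--     return "".join(reversed(rev))
--
--
-- def _parse_number(core: str) -> "str | None":
--     sign = ""
--     if core[:1] in ("+", "-"):
--         sign, core = core[0], core[1:]
--     if core.count(".") > 1:
--         return None
--     int_part, dot, frac = core.partition(".")
--     digits = _scan_grouped(int_part)
--     if digits is None:
--         return None
--     return sign + digits + (dot + frac if dot else "")
--
--
-- def _parse(stripped: str) -> "str | None":
--     if stripped.startswith("(") and stripped.endswith(")"):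
--         body = _parse_number(stripped[1:-1])
--         return None if body is None else "(" + body + ")"
--     if "(" in stripped or ")" in stripped:
--         return None
--     return _parse_number(stripped)
--
--
-- def _remove_numeric_thousands_separators(value: str) -> str:
--     out = _parse(value.strip())
--     return value if out is None else out
-- ===== Notes on version B (the rewrite author's own statement) =====
-- stated objective: alternative
-- what changed: B replaces A's early-return chain and split-on-comma per-group checks by an Option-returning parser pipeline whose core is a single indexed right-to-left scan of the integer part (position i from the right must be ',' iff i % 4 == 3, a digit otherwise, with a length precheck), collecting the digits as it goes; A's separate comma-presence guard disappears entirely.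
import Mathlib
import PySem

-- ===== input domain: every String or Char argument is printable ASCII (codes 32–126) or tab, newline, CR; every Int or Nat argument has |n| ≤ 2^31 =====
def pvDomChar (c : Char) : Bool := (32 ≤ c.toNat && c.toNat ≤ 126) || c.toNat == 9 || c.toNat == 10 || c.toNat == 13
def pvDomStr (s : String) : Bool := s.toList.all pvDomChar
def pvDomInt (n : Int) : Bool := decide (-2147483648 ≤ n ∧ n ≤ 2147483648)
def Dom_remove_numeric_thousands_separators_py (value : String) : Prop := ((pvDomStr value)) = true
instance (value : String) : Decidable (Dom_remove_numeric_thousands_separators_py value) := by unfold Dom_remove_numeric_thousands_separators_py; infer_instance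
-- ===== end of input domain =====

-- B replaces A's early-return chain with split-on-comma group checks by an Option-returning
-- parser pipeline whose core is one indexed right-to-left scan of the integer part (char at
-- position i from the right is ',' iff i % 4 == 3, a digit otherwise); A's comma-presence
-- guard disappears entirely (objective: alternative decomposition, same cost).

-- shared hand-port of Python's s.partition(".") (PySem has no partition): exact — first '.' splits,
-- absent '.' gives (s, "", "")
def pyPartitionDot (cs : List Char) : List Char × List Char × List Char :=
  let i := PySem.Chars.find cs ['.']
  if i = -1 then (cs, [], []) else (cs.take i.toNat, ['.'], cs.drop (i.toNat + 1))

-- ===== PORT A =====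
def remove_numeric_thousands_separators_py (value : String) : String :=
  let stripped := PySem.Chars.strip value.toList
  if !(PySem.Chars.isIn [','] stripped) then value else
  let accNeg := PySem.Chars.startswith stripped ['('] && PySem.Chars.endswith stripped [')']
  if (PySem.Chars.isIn ['('] stripped || PySem.Chars.isIn [')'] stripped) && !accNeg then value else
  let core0 := if accNeg then PySem.Chars.slice stripped (some 1) (some (-1)) else stripped
  if core0.isEmpty then value else
  -- core[0] in {"+","-"} (core nonempty here, so pyGet? core 0 is its head)
  let c0 := PySem.List.pyGet? core0 0
  let isSign := c0 == some '+' || c0 == some '-'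
  let sign : List Char := if isSign then core0.take 1 else []
  let core := if isSign then core0.drop 1 else core0
  if core.isEmpty then value else
  if PySem.Chars.count core ['.'] > 1 then value else
  let p := pyPartitionDot core
  if p.1.isEmpty then value else
  let groups := PySem.Chars.splitOn p.1 [',']
  if groups.length ≤ 1 then value else
  if !(PySem.Chars.strIsdigit (groups.headD [])) || decide ((groups.headD []).length > 3) then value else
  if groups.tail.any (fun g => !(PySem.Chars.strIsdigit g) || decide (g.length ≠ 3)) then value else
  -- "".join(groups) is groups.flatten
  let normalized := sign ++ groups.flatten ++ (if p.2.1.isEmpty then [] else p.2.1 ++ p.2.2)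
  if accNeg then String.ofList ('(' :: (normalized ++ [')'])) else String.ofList normalized

-- ===== PORT B =====
-- Source B's _scan_grouped loop: index i runs over the REVERSED integer part; the early
-- 'return None' paths are modeled by Option (none = rejected); the collected digit list is in
-- traversal order (Python's `rev` list), reversed at the end exactly as `"".join(reversed(rev))`.
def scanRevB : Nat → List Char → Option (List Char)
  | _, [] => some []
  | i, c :: r =>
    if i % 4 = 3 then (if c = ',' then scanRevB (i + 1) r else none)
    else if PySem.Chars.isdigit c then (scanRevB (i + 1) r).map (fun d => c :: d) else none

def scanGrouped (ip : List Char) : Option (List Char) :=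
  if ip.length < 5 || ip.length % 4 == 0 then none
  else (scanRevB 0 ip.reverse).map List.reverse

def parseNumberB (core0 : List Char) : Option (List Char) :=
  let t1 := core0.take 1
  let isSign := t1 == ['+'] || t1 == ['-']
  let sign : List Char := if isSign then t1 else []
  let core := if isSign then core0.drop 1 else core0
  if PySem.Chars.count core ['.'] > 1 then none
  else
    let p := pyPartitionDot core
    match scanGrouped p.1 with
    | none => none
    | some ds => some (sign ++ ds ++ (if p.2.1.isEmpty then [] else p.2.1 ++ p.2.2))

def parseStrippedB (s : List Char) : Option (List Char) :=
  if PySem.Chars.startswith s ['('] && PySem.Chars.endswith s [')'] then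
    match parseNumberB (PySem.Chars.slice s (some 1) (some (-1))) with
    | none => none
    | some b => some ('(' :: (b ++ [')']))
  else if PySem.Chars.isIn ['('] s || PySem.Chars.isIn [')'] s then none
  else parseNumberB s

def remove_numeric_thousands_separators_py_alt (value : String) : String :=
  match parseStrippedB (PySem.Chars.strip value.toList) with
  | none => value
  | some out => String.ofList out

-- ===== PRECONDITION & SPEC =====
def Spec_remove_numeric_thousands_separators_py (value : String) (out : String) : Prop := out = remove_numeric_thousands_separators_py_alt value
instance (value : String) (out : String) : Decidable (Spec_remove_numeric_thousands_separators_py value out) := by unfold Spec_remove_numeric_thousands_separators_py; infer_instance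

-- ===== CLAIM (what is proved, stated in full; the proofs are below) =====
def Claim_equal_remove_numeric_thousands_separators_py : Prop := ∀ (value : String), Dom_remove_numeric_thousands_separators_py value → Spec_remove_numeric_thousands_separators_py value (remove_numeric_thousands_separators_py value)

-- ===== LEMMAS AND PROOFS =====

-- proof-side clean model of split(",")
def mySplit : List Char → List (List Char)
  | [] => [[]]
  | c :: r =>
    if c = ',' then [] :: mySplit r
    else match mySplit r with
      | [] => [[c]]
      | g :: gs => (c :: g) :: gs

-- proof-side clean model of ",".join
def joinC : List (List Char) → List Char
  | [] => []
  | [g] => g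
  | g :: h :: t => g ++ ',' :: joinC (h :: t)

theorem mySplit_ne_nil (l : List Char) : mySplit l ≠ [] := by
  induction l with
  | nil => simp [mySplit]
  | cons c r ih =>
    simp only [mySplit]
    split
    · simp
    · split <;> simp_all

theorem splitOn_go_comma (fuel : ℕ) : ∀ (l cur : List Char) (acc : List (List Char)), l.length ≤ fuel →
    PySem.Chars.splitOn.go [','] fuel l cur acc =
      acc.reverse ++ ((cur.reverse ++ (mySplit l).headD []) :: (mySplit l).tail) := by
  induction fuel with
  | zero =>
    intro l cur acc h
    have hl : l = [] := by cases l <;> simp_all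
    subst hl
    rw [PySem.Chars.splitOn.go]
    simp [mySplit]
  | succ f ih =>
    intro l cur acc h
    cases l with
    | nil => rw [PySem.Chars.splitOn.go] <;> simp [mySplit]
    | cons c rest =>
      rw [PySem.Chars.splitOn.go]
      by_cases hc : c = ','
      · subst hc
        simp only [List.isPrefixOf, BEq.rfl, Bool.true_and, if_true,
          List.length_singleton, List.drop_succ_cons, List.drop_zero]
        rw [ih rest [] (cur.reverse :: acc) (by simpa using Nat.le_of_succ_le_succ h)]
        obtain ⟨g, gs, hg⟩ := List.exists_cons_of_ne_nil (mySplit_ne_nil rest)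
        simp [mySplit, hg]
      · have hp : [','].isPrefixOf (c :: rest) = false := by
          simp [List.isPrefixOf]; exact fun h' => absurd h'.symm hc
        rw [hp]
        simp only [Bool.false_eq_true, if_false]
        rw [ih rest (c :: cur) acc (by simpa using Nat.le_of_succ_le_succ h)]
        obtain ⟨g, gs, hg⟩ := List.exists_cons_of_ne_nil (mySplit_ne_nil rest)
        simp [mySplit, hg, hc]

theorem splitOn_comma_eq (l : List Char) : PySem.Chars.splitOn l [','] = mySplit l := by
  unfold PySem.Chars.splitOn
  rw [splitOn_go_comma (l.length + 1) l [] [] (by omega)]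
  obtain ⟨g, gs, hg⟩ := List.exists_cons_of_ne_nil (mySplit_ne_nil l)
  simp [hg]

theorem mySplit_no_comma {l : List Char} (h : ',' ∉ l) : mySplit l = [l] := by
  induction l with
  | nil => rfl
  | cons c r ih =>
    have hc : c ≠ ',' := fun e => h (e ▸ List.mem_cons_self ..)
    have hr : ',' ∉ r := fun e => h (List.mem_cons_of_mem _ e)
    simp [mySplit, hc, ih hr]

theorem mySplit_append {g : List Char} (hg : ',' ∉ g) (xs : List Char) :
    mySplit (xs ++ ',' :: g) = mySplit xs ++ [g] := by
  induction xs with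
  | nil => simp [mySplit, mySplit_no_comma hg]
  | cons c xs ih =>
    by_cases hc : c = ','
    · subst hc; simp [mySplit, ih]
    · obtain ⟨h, t, ht⟩ := List.exists_cons_of_ne_nil (mySplit_ne_nil xs)
      simp only [List.cons_append]
      simp [mySplit, hc, ih, ht]

theorem joinC_cons_cons (a : List Char) (g : List Char) (gs : List (List Char)) :
    joinC ((a ++ g) :: gs) = a ++ joinC (g :: gs) := by
  cases gs <;> simp [joinC]

theorem mySplit_joinC (l : List Char) : joinC (mySplit l) = l := by
  induction l with
  | nil => rfl
  | cons c r ih =>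
    by_cases hc : c = ','
    · subst hc
      obtain ⟨g, gs, hg⟩ := List.exists_cons_of_ne_nil (mySplit_ne_nil r)
      simp only [mySplit]
      rw [hg]
      rw [hg] at ih
      simp [joinC, ih]
    · obtain ⟨g, gs, hg⟩ := List.exists_cons_of_ne_nil (mySplit_ne_nil r)
      rw [hg] at ih
      have hms : mySplit (c :: r) = (c :: g) :: gs := by simp [mySplit, hc, hg]
      rw [hms, show (c :: g) = [c] ++ g from rfl, joinC_cons_cons [c] g gs, ih]
      rfl

theorem joinC_cons {t : List (List Char)} (ht : t ≠ []) (a : List Char) :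
    joinC (a :: t) = a ++ ',' :: joinC t := by
  cases t with
  | nil => simp at ht
  | cons b t' => rfl

theorem joinC_concat {l : List (List Char)} (hl : l ≠ []) (g : List Char) :
    joinC (l ++ [g]) = joinC l ++ ',' :: g := by
  induction l with
  | nil => simp at hl
  | cons a t ih =>
    rw [show (a :: t) ++ [g] = a :: (t ++ [g]) from rfl, joinC_cons (by simp)]
    cases t with
    | nil => simp [joinC]
    | cons b t' =>
      rw [ih (by simp), joinC_cons (t := b :: t') (by simp) a]
      simp

theorem strIsdigit_ne_nil {g : List Char} (h : PySem.Chars.strIsdigit g = true) : g ≠ [] := by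
  intro e; subst e; simp [PySem.Chars.strIsdigit] at h

theorem strIsdigit_mem {g : List Char} (h : PySem.Chars.strIsdigit g = true) :
    ∀ c ∈ g, PySem.Chars.isdigit c = true := by
  simp only [PySem.Chars.strIsdigit, Bool.and_eq_true, List.all_eq_true] at h
  exact h.2

theorem strIsdigit_of_mem {g : List Char} (hne : g ≠ [])
    (h : ∀ c ∈ g, PySem.Chars.isdigit c = true) : PySem.Chars.strIsdigit g = true := by
  simp only [PySem.Chars.strIsdigit, Bool.and_eq_true, List.all_eq_true]
  exact ⟨by simpa using hne, h⟩

theorem isdigit_ne_comma {c : Char} (h : PySem.Chars.isdigit c = true) : c ≠ ',' := by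
  intro e; subst e; simp [PySem.Chars.isdigit] at h

theorem singleton_infix {c : Char} {l : List Char} : [c] <:+: l ↔ c ∈ l := by
  constructor
  · intro h
    exact List.singleton_sublist.mp h.sublist
  · intro h
    obtain ⟨s, t, rfl⟩ := List.append_of_mem h
    exact ⟨s, t, by simp⟩

theorem pyGet?_zero_cons (c : Char) (rest : List Char) :
    PySem.List.pyGet? (c :: rest) 0 = some c := by
  simp [PySem.List.pyGet?, PySem.List.pyIdx?]

-- the scan only reads the index mod 4
theorem scanRevB_mod (l : List Char) : ∀ i, scanRevB i l = scanRevB (i % 4) l := by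
  induction l with
  | nil => intro i; rfl
  | cons c r ih =>
    intro i
    have h1 : (i + 1) % 4 = (i % 4 + 1) % 4 := by omega
    have h2 : i % 4 % 4 = i % 4 := by omega
    simp only [scanRevB, h2]
    rw [ih (i + 1), ih (i % 4 + 1), h1]

theorem scanRevB_small_some {l : List Char} (h3 : l.length ≤ 3)
    (hd : ∀ c ∈ l, PySem.Chars.isdigit c = true) : scanRevB 0 l = some l := by
  rcases l with _ | ⟨a, _ | ⟨b, _ | ⟨c, _ | ⟨k, r⟩⟩⟩⟩
  · rfl
  · simp [scanRevB, hd a (by simp)]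
  · simp [scanRevB, hd a (by simp), hd b (by simp)]
  · simp [scanRevB, hd a (by simp), hd b (by simp), hd c (by simp)]
  · simp at h3; omega

theorem scanRevB_small_inv {l d : List Char} (h3 : l.length ≤ 3)
    (h : scanRevB 0 l = some d) : (∀ c ∈ l, PySem.Chars.isdigit c = true) ∧ d = l := by
  rcases l with _ | ⟨a, _ | ⟨b, _ | ⟨c, _ | ⟨k, r⟩⟩⟩⟩
  · simp [scanRevB] at h
    simp [h]
  · simp [scanRevB] at h
    obtain ⟨h1, h2⟩ := h
    exact ⟨by simp [h1], h2.symm⟩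
  · simp [scanRevB] at h
    obtain ⟨h1, h2, h3'⟩ := h
    exact ⟨by simp [h1, h2], h3'.symm⟩
  · simp [scanRevB] at h
    obtain ⟨h1, hrest, h4⟩ := h
    exact ⟨by simp [h1, hrest.1, hrest.2], h4.symm⟩
  · simp at h3; omega

theorem scanRevB_block {g : List Char} (hlen : g.length = 3)
    (hd : ∀ c ∈ g, PySem.Chars.isdigit c = true) (rest : List Char) :
    scanRevB 0 (g.reverse ++ ',' :: rest) = (scanRevB 0 rest).map (fun d => g.reverse ++ d) := by
  rcases g with _ | ⟨x, _ | ⟨y, _ | ⟨z, _ | ⟨w, r⟩⟩⟩⟩ <;> try simp at hlen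
  have hx := hd x (by simp)
  have hy := hd y (by simp)
  have hz := hd z (by simp)
  cases hsr : scanRevB 0 rest <;>
    simp [scanRevB, hx, hy, hz, scanRevB_mod rest 4, hsr]

theorem joinC_length : ∀ (G : List (List Char)) (g0 : List Char),
    (∀ g ∈ G, g.length = 3) → (joinC (g0 :: G)).length = g0.length + 4 * G.length := by
  intro G
  induction G with
  | nil => intro g0 _; simp [joinC]
  | cons g G ih =>
    intro g0 h
    rw [joinC_cons (by simp)]
    have := ih g (fun x hx => h x (by simp [hx]))
    simp only [List.length_append, List.length_cons, this, h g (by simp)]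
    ring

theorem scan_join : ∀ (G : List (List Char)) (g0 : List Char),
    (∀ g ∈ G, g.length = 3 ∧ ∀ c ∈ g, PySem.Chars.isdigit c = true) →
    (∀ c ∈ g0, PySem.Chars.isdigit c = true) → g0.length ≤ 3 →
    scanRevB 0 ((joinC (g0 :: G)).reverse) = some ((g0 :: G).flatten.reverse) := by
  intro G
  induction G using List.reverseRecOn with
  | nil =>
    intro g0 _ hd h3
    simpa [joinC] using scanRevB_small_some (by simpa using h3) (by simpa using hd)
  | append_singleton G g ih =>
    intro g0 hG hd h3
    have hg := hG g (by simp)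
    rw [show g0 :: (G ++ [g]) = (g0 :: G) ++ [g] from rfl,
        joinC_concat (l := g0 :: G) (by simp) g]
    rw [show (joinC (g0 :: G) ++ ',' :: g).reverse
          = g.reverse ++ ',' :: (joinC (g0 :: G)).reverse by simp]
    rw [scanRevB_block hg.1 hg.2, ih g0 (fun x hx => hG x (by simp [hx])) hd h3]
    simp

theorem scan_struct : ∀ (N : ℕ) (l d : List Char), l.length ≤ N → 1 ≤ l.length →
    l.length % 4 ≠ 0 → scanRevB 0 l = some d →
    ∃ g0 gs, mySplit l.reverse = g0 :: gs ∧ 1 ≤ g0.length ∧ g0.length ≤ 3 ∧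
      (∀ c ∈ g0, PySem.Chars.isdigit c = true) ∧
      (∀ g ∈ gs, g.length = 3 ∧ ∀ c ∈ g, PySem.Chars.isdigit c = true) ∧
      (g0 :: gs).flatten = d.reverse ∧ gs.length * 4 + g0.length = l.length := by
  intro N
  induction N with
  | zero =>
    intro l d h hp _ _
    omega
  | succ n ih =>
    intro l d hN hp hm hs
    by_cases h3 : l.length ≤ 3
    · obtain ⟨hd, hdl⟩ := scanRevB_small_inv h3 hs
      have hnc : ',' ∉ l.reverse := by
        intro e
        exact isdigit_ne_comma (hd ',' (by simpa using e)) rfl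
      refine ⟨l.reverse, [], mySplit_no_comma hnc, by simpa using hp, by simpa using h3,
        fun c hc => hd c (by simpa using hc), by simp, by simp [hdl], by simp⟩
    · have h4 : 4 ≤ l.length := by omega
      obtain ⟨a, b, c, k, r, rfl⟩ : ∃ a b c k r, l = a :: b :: c :: k :: r := by
        rcases l with _ | ⟨a, _ | ⟨b, _ | ⟨c, _ | ⟨k, r⟩⟩⟩⟩
        · simp at h4
        · simp at h4
        · simp at h4
        · simp at h4
        · exact ⟨a, b, c, k, r, rfl⟩
      simp [scanRevB] at hs
      obtain ⟨ha, a3, ⟨hb, hc, hk, hs4⟩, e0⟩ := hs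
      subst e0; subst hk
      have hd' : scanRevB 0 r = some a3 := by
        rw [← hs4, scanRevB_mod r 4]
      have hr1 : 1 ≤ r.length := by simp at hN hp hm ⊢; omega
      have hrm : r.length % 4 ≠ 0 := by simp at hm; omega
      obtain ⟨g0, gs, hms, p1, p2, p3, p4, p5, p6⟩ := ih r a3 (by simp at hN; omega) hr1 hrm hd'
      have hrev : (a :: b :: c :: ',' :: r).reverse = r.reverse ++ ',' :: [c, b, a] := by
        simp
      have hncg : ',' ∉ ([c, b, a] : List Char) := by
        simp only [List.mem_cons, List.not_mem_nil, or_false, not_or]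
        exact ⟨fun e => isdigit_ne_comma hc e.symm, fun e => isdigit_ne_comma hb e.symm,
          fun e => isdigit_ne_comma ha e.symm⟩
      refine ⟨g0, gs ++ [[c, b, a]], ?_, p1, p2, p3, ?_, ?_, ?_⟩
      · rw [hrev, mySplit_append hncg, hms]
        rfl
      · intro g hg
        rcases List.mem_append.mp hg with e | e
        · exact p4 g e
        · simp at e; subst e
          refine ⟨rfl, ?_⟩
          intro x hx
          simp only [List.mem_cons, List.not_mem_nil, or_false] at hx
          rcases hx with rfl | rfl | rfl
          · exact hc
          · exact hb
          · exact ha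
      · have he : (g0 :: (gs ++ [[c, b, a]])).flatten = (g0 :: gs).flatten ++ [c, b, a] := by simp
        rw [he, p5]
        simp
      · simp only [List.length_append, List.length_cons, List.length_nil]
        simp at p6 ⊢
        omega

-- A's per-group guard chain on the integer part computes exactly B's positional scan
theorem main2 (ip : List Char) :
    (let groups := PySem.Chars.splitOn ip [','];
     if groups.length ≤ 1 then none
     else if !(PySem.Chars.strIsdigit (groups.headD [])) || decide ((groups.headD []).length > 3) then none
     else if groups.tail.any (fun g => !(PySem.Chars.strIsdigit g) || decide (g.length ≠ 3)) then none
     else some groups.flatten)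
    = scanGrouped ip := by
  simp only [splitOn_comma_eq]
  obtain ⟨g0, gs, hg⟩ := List.exists_cons_of_ne_nil (mySplit_ne_nil ip)
  rw [hg]
  cases hS : scanGrouped ip with
  | none =>
    by_cases h1 : (g0 :: gs).length ≤ 1
    · rw [if_pos h1]
    rw [if_neg h1]
    obtain ⟨g1, gs', rfl⟩ : ∃ g1 gs', gs = g1 :: gs' := by
      cases gs with
      | nil => simp at h1
      | cons a b => exact ⟨a, b, rfl⟩
    by_cases h2 : (!(PySem.Chars.strIsdigit ((g0 :: g1 :: gs').headD [])) ||
        decide (((g0 :: g1 :: gs').headD []).length > 3)) = true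
    · rw [if_pos h2]
    rw [if_neg h2]
    by_cases h3 : ((g0 :: g1 :: gs').tail.any
        (fun g => !(PySem.Chars.strIsdigit g) || decide (g.length ≠ 3))) = true
    · rw [if_pos h3]
    rw [if_neg h3]
    exfalso
    rw [Bool.not_eq_true, List.headD_cons, Bool.or_eq_false_iff] at h2
    obtain ⟨ha2, ha2'⟩ := h2
    rw [Bool.not_eq_false'] at ha2
    have hl0 : g0.length ≤ 3 := by simpa using of_decide_eq_false ha2'
    have hl0' : 1 ≤ g0.length := List.length_pos_iff.mpr (strIsdigit_ne_nil ha2)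
    rw [Bool.not_eq_true, List.tail_cons, List.any_eq_false] at h3
    have hrest : ∀ g ∈ g1 :: gs', g.length = 3 ∧ ∀ c ∈ g, PySem.Chars.isdigit c = true := by
      intro g hgm
      have := h3 g hgm
      rw [Bool.not_eq_true, Bool.or_eq_false_iff, Bool.not_eq_false'] at this
      exact ⟨by simpa using of_decide_eq_false this.2, strIsdigit_mem this.1⟩
    have hjoin : ip = joinC (g0 :: g1 :: gs') := by rw [← hg, mySplit_joinC]
    have hlen : ip.length = g0.length + 4 * (gs'.length + 1) := by
      rw [hjoin, joinC_length (g1 :: gs') g0 (fun g hgm => (hrest g hgm).1)]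
      simp
    have hguard : (ip.length < 5 || ip.length % 4 == 0) = false := by
      simp only [Bool.or_eq_false_iff, decide_eq_false_iff_not, beq_eq_false_iff_ne]
      omega
    have hscan := scan_join (g1 :: gs') g0 hrest (strIsdigit_mem ha2) hl0
    rw [← hjoin] at hscan
    rw [scanGrouped, hguard] at hS
    simp [hscan] at hS
  | some d =>
    rw [scanGrouped] at hS
    by_cases hguard : (ip.length < 5 || ip.length % 4 == 0) = true
    · rw [if_pos hguard] at hS; cases hS
    rw [if_neg hguard] at hS
    simp only [Bool.or_eq_true, decide_eq_true_eq, beq_iff_eq, not_or] at hguard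
    obtain ⟨hg5, hg4⟩ := hguard
    have h5 : 5 ≤ ip.length := by omega
    have h4 : ip.length % 4 ≠ 0 := hg4
    obtain ⟨d0, hd0, hdd⟩ := Option.map_eq_some_iff.mp hS
    obtain ⟨g0', gs₂, hms, p1, p2, p3, p4, p5, p6⟩ :=
      scan_struct ip.reverse.length ip.reverse d0 le_rfl (by simpa using by omega)
        (by simpa using h4) hd0
    rw [List.reverse_reverse] at hms
    rw [hg] at hms
    injection hms with e1 e2
    subst e1; subst e2
    have hlrev : ip.reverse.length = ip.length := by simp
    rw [hlrev] at p6
    obtain ⟨g1, gs', rfl⟩ : ∃ g1 gs', gs = g1 :: gs' := by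
      cases gs with
      | nil => simp at p6; omega
      | cons a b => exact ⟨a, b, rfl⟩
    rw [if_neg (by simp), if_neg ?hc2, if_neg ?hc3]
    case hc2 =>
      rw [Bool.not_eq_true, List.headD_cons, Bool.or_eq_false_iff]
      refine ⟨?_, decide_eq_false (by omega)⟩
      rw [Bool.not_eq_false']
      exact strIsdigit_of_mem (List.length_pos_iff.mp (by omega)) p3
    case hc3 =>
      rw [Bool.not_eq_true, List.tail_cons, List.any_eq_false]
      intro g hgm
      rw [Bool.not_eq_true, Bool.or_eq_false_iff]
      obtain ⟨hg3, hgd⟩ := p4 g hgm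
      refine ⟨?_, decide_eq_false (by simp [hg3])⟩
      rw [Bool.not_eq_false']
      exact strIsdigit_of_mem (by intro e; rw [e] at hg3; simp at hg3) hgd
    rw [p5, ← hdd]

-- a successful scan implies the integer part contains a comma
theorem comma_of_scanGrouped {ip d : List Char} (h : scanGrouped ip = some d) : ',' ∈ ip := by
  rw [scanGrouped] at h
  by_cases hguard : (ip.length < 5 || ip.length % 4 == 0) = true
  · rw [if_pos hguard] at h; cases h
  rw [if_neg hguard] at h
  simp only [Bool.or_eq_true, decide_eq_true_eq, beq_iff_eq, not_or] at hguard
  obtain ⟨hg5, hg4⟩ := hguard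
  obtain ⟨d0, hd0, _⟩ := Option.map_eq_some_iff.mp h
  obtain ⟨g0, gs, hms, _, p2, _, _, _, p6⟩ :=
    scan_struct ip.reverse.length ip.reverse d0 le_rfl (by simp; omega)
      (by simpa using hg4) hd0
  rw [List.reverse_reverse] at hms
  have hlrev : ip.reverse.length = ip.length := by simp
  rw [hlrev] at p6
  obtain ⟨g1, gs', rfl⟩ : ∃ g1 gs', gs = g1 :: gs' := by
    cases gs with
    | nil => simp at p6; omega
    | cons a b => exact ⟨a, b, rfl⟩
  have hj : ip = joinC (g0 :: g1 :: gs') := by rw [← hms, mySplit_joinC]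
  rw [hj, joinC_cons (by simp)]
  simp

theorem mem_of_mem_partition1 {c : Char} {cs : List Char}
    (h : c ∈ (pyPartitionDot cs).1) : c ∈ cs := by
  rw [pyPartitionDot] at h
  split at h
  · exact h
  · exact List.mem_of_mem_take h

theorem comma_of_parseNumberB {core0 b : List Char} (h : parseNumberB core0 = some b) :
    ',' ∈ core0 := by
  rcases e : scanGrouped (pyPartitionDot
      (if core0.take 1 == ['+'] || core0.take 1 == ['-'] then core0.drop 1 else core0)).1
    with _ | ds
  · exfalso
    rw [parseNumberB] at h
    simp only [] at h
    by_cases hdot : PySem.Chars.count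
        (if core0.take 1 == ['+'] || core0.take 1 == ['-'] then core0.drop 1 else core0) ['.'] > 1
    · rw [if_pos hdot] at h
      simp at h
    · rw [if_neg hdot, e] at h
      simp at h
  · have h1 := mem_of_mem_partition1 (comma_of_scanGrouped e)
    split_ifs at h1
    · exact List.mem_of_mem_drop h1
    · exact h1

theorem comma_of_parseStrippedB {s b : List Char} (h : parseStrippedB s = some b) : ',' ∈ s := by
  rw [parseStrippedB] at h
  by_cases h1 : (PySem.Chars.startswith s ['('] && PySem.Chars.endswith s [')']) = true
  · rw [if_pos h1] at h
    rcases e : parseNumberB (PySem.Chars.slice s (some 1) (some (-1))) with _ | b'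
    · rw [e] at h
      simp at h
    · exact PySem.List.mem_of_mem_slice s (some 1) (some (-1)) (comma_of_parseNumberB e)
  · rw [if_neg h1] at h
    by_cases h2 : (PySem.Chars.isIn ['('] s || PySem.Chars.isIn [')'] s) = true
    · rw [if_pos h2] at h
      simp at h
    · rw [if_neg h2] at h
      exact comma_of_parseNumberB h

-- the guard chain with an abstract continuation (old-style reduction of main2)
theorem chain_eq2 (value : String) (ip : List Char) (finish : List Char → String) :
    (if (PySem.Chars.splitOn ip [',']).length ≤ 1 then value
     else if !(PySem.Chars.strIsdigit ((PySem.Chars.splitOn ip [',']).headD [])) ||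
         decide (((PySem.Chars.splitOn ip [',']).headD []).length > 3) then value
     else if (PySem.Chars.splitOn ip [',']).tail.any
         (fun g => !(PySem.Chars.strIsdigit g) || decide (g.length ≠ 3)) then value
     else finish ((PySem.Chars.splitOn ip [',']).flatten))
    = (match scanGrouped ip with
       | none => value
       | some ds => finish ds) := by
  have h := main2 ip
  simp only [] at h
  cases hsc : scanGrouped ip with
  | none =>
    rw [hsc] at h
    split_ifs at h ⊢ <;> simp_all
  | some ds =>
    rw [hsc] at h
    split_ifs at h ⊢
    all_goals simp_all

-- A's tail from the dot-count check on, against parseNumberB's body, sign and core fixed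
theorem tail2 (value : String) (finish : List Char → String) (sign core : List Char) :
    (if core.isEmpty then value
     else if PySem.Chars.count core ['.'] > 1 then value
     else if (pyPartitionDot core).1.isEmpty then value
     else if (PySem.Chars.splitOn (pyPartitionDot core).1 [',']).length ≤ 1 then value
     else if !(PySem.Chars.strIsdigit ((PySem.Chars.splitOn (pyPartitionDot core).1 [',']).headD [])) ||
         decide (((PySem.Chars.splitOn (pyPartitionDot core).1 [',']).headD []).length > 3) then value
     else if (PySem.Chars.splitOn (pyPartitionDot core).1 [',']).tail.any
         (fun g => !(PySem.Chars.strIsdigit g) || decide (g.length ≠ 3)) then value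
     else finish (sign ++ (PySem.Chars.splitOn (pyPartitionDot core).1 [',']).flatten ++
       (if (pyPartitionDot core).2.1.isEmpty then [] else (pyPartitionDot core).2.1 ++ (pyPartitionDot core).2.2)))
    = (match
        (if PySem.Chars.count core ['.'] > 1 then none
         else match scanGrouped (pyPartitionDot core).1 with
           | none => none
           | some ds => some (sign ++ ds ++
               (if (pyPartitionDot core).2.1.isEmpty then [] else (pyPartitionDot core).2.1 ++ (pyPartitionDot core).2.2)))
       with
       | none => value
       | some b => finish b) := by
  by_cases hdot : PySem.Chars.count core ['.'] > 1
  · have hne : core ≠ [] := by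
      intro e; subst e; revert hdot; decide
    rw [if_neg (by simpa using hne), if_pos hdot, if_pos hdot]
  · rw [if_neg hdot, if_neg hdot]
    rcases core with _ | ⟨c, cs⟩
    · rw [if_pos (show ([] : List Char).isEmpty = true from rfl)]
      have hsg : scanGrouped (pyPartitionDot ([] : List Char)).1 = none := by decide
      rw [hsg]
    · rw [if_neg (by simp)]
      by_cases hip : (pyPartitionDot (c :: cs)).1 = []
      · rw [if_pos (show (pyPartitionDot (c :: cs)).1.isEmpty = true by rw [hip]; rfl), hip]
        have hsg : scanGrouped ([] : List Char) = none := by decide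
        rw [hsg]
      · rw [if_neg (by simpa using hip)]
        refine (chain_eq2 value (pyPartitionDot (c :: cs)).1
          (fun x => finish (sign ++ x ++
            (if (pyPartitionDot (c :: cs)).2.1.isEmpty then []
             else (pyPartitionDot (c :: cs)).2.1 ++ (pyPartitionDot (c :: cs)).2.2)))).trans ?_
        cases scanGrouped (pyPartitionDot (c :: cs)).1 <;> rfl

-- A's tail from the core0-emptiness check on, against parseNumberB
theorem tail1 (value : String) (finish : List Char → String) (core0 : List Char) :
    (if core0.isEmpty then value
     else if (if PySem.List.pyGet? core0 0 == some '+' || PySem.List.pyGet? core0 0 == some '-' then core0.drop 1 else core0).isEmpty then value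
     else if PySem.Chars.count (if PySem.List.pyGet? core0 0 == some '+' || PySem.List.pyGet? core0 0 == some '-' then core0.drop 1 else core0) ['.'] > 1 then value
     else if (pyPartitionDot (if PySem.List.pyGet? core0 0 == some '+' || PySem.List.pyGet? core0 0 == some '-' then core0.drop 1 else core0)).1.isEmpty then value
     else if (PySem.Chars.splitOn (pyPartitionDot (if PySem.List.pyGet? core0 0 == some '+' || PySem.List.pyGet? core0 0 == some '-' then core0.drop 1 else core0)).1 [',']).length ≤ 1 then value
     else if !(PySem.Chars.strIsdigit ((PySem.Chars.splitOn (pyPartitionDot (if PySem.List.pyGet? core0 0 == some '+' || PySem.List.pyGet? core0 0 == some '-' then core0.drop 1 else core0)).1 [',']).headD [])) ||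
         decide (((PySem.Chars.splitOn (pyPartitionDot (if PySem.List.pyGet? core0 0 == some '+' || PySem.List.pyGet? core0 0 == some '-' then core0.drop 1 else core0)).1 [',']).headD []).length > 3) then value
     else if (PySem.Chars.splitOn (pyPartitionDot (if PySem.List.pyGet? core0 0 == some '+' || PySem.List.pyGet? core0 0 == some '-' then core0.drop 1 else core0)).1 [',']).tail.any
         (fun g => !(PySem.Chars.strIsdigit g) || decide (g.length ≠ 3)) then value
     else finish ((if PySem.List.pyGet? core0 0 == some '+' || PySem.List.pyGet? core0 0 == some '-' then core0.take 1 else []) ++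
       (PySem.Chars.splitOn (pyPartitionDot (if PySem.List.pyGet? core0 0 == some '+' || PySem.List.pyGet? core0 0 == some '-' then core0.drop 1 else core0)).1 [',']).flatten ++
       (if (pyPartitionDot (if PySem.List.pyGet? core0 0 == some '+' || PySem.List.pyGet? core0 0 == some '-' then core0.drop 1 else core0)).2.1.isEmpty then []
        else (pyPartitionDot (if PySem.List.pyGet? core0 0 == some '+' || PySem.List.pyGet? core0 0 == some '-' then core0.drop 1 else core0)).2.1 ++
          (pyPartitionDot (if PySem.List.pyGet? core0 0 == some '+' || PySem.List.pyGet? core0 0 == some '-' then core0.drop 1 else core0)).2.2)))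
    = (match parseNumberB core0 with
       | none => value
       | some b => finish b) := by
  rcases core0 with _ | ⟨c, rest⟩
  · rw [if_pos (show ([] : List Char).isEmpty = true from rfl)]
    have : parseNumberB [] = none := by decide
    rw [this]
  · have e3 : (PySem.List.pyGet? (c :: rest) 0 == some '+' || PySem.List.pyGet? (c :: rest) 0 == some '-')
        = ((c :: rest).take 1 == ['+'] || (c :: rest).take 1 == ['-']) := by
      rw [pyGet?_zero_cons]
      show (c == '+' || c == '-') = ([c] == ['+'] || [c] == ['-'])
      simp
    rw [if_neg (by simp), e3, parseNumberB]
    simp only []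
    exact tail2 value finish _ _

-- ===== VERDICT (by name: the statement is the Claim_ definition above) =====
theorem remove_numeric_thousands_separators_py_spec : Claim_equal_remove_numeric_thousands_separators_py := by
  intro value _
  unfold Spec_remove_numeric_thousands_separators_py
  unfold remove_numeric_thousands_separators_py remove_numeric_thousands_separators_py_alt
  simp only []
  by_cases hcm : PySem.Chars.isIn [','] (PySem.Chars.strip value.toList) = true
  case neg =>
    rw [Bool.not_eq_true] at hcm
    rw [if_pos (show (!(PySem.Chars.isIn [','] (PySem.Chars.strip value.toList))) = true by
          rw [hcm]; rfl)]
    have hnone : parseStrippedB (PySem.Chars.strip value.toList) = none := by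
      rcases e : parseStrippedB (PySem.Chars.strip value.toList) with _ | b
      · rfl
      · exfalso
        have hmem := comma_of_parseStrippedB e
        have : PySem.Chars.isIn [','] (PySem.Chars.strip value.toList) = true :=
          (PySem.Chars.isIn_iff_infix _ _).mpr (singleton_infix.mpr hmem)
        rw [hcm] at this; cases this
    rw [hnone]
  rw [if_neg (show ¬ (!(PySem.Chars.isIn [','] (PySem.Chars.strip value.toList))) = true by
        rw [hcm]; simp)]
  rw [parseStrippedB]
  by_cases hacc : (PySem.Chars.startswith (PySem.Chars.strip value.toList) ['('] &&
      PySem.Chars.endswith (PySem.Chars.strip value.toList) [')']) = true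
  · rw [hacc]
    simp only [Bool.not_true, Bool.and_false, Bool.false_eq_true, if_false, if_true]
    refine (tail1 value (fun b => String.ofList ('(' :: (b ++ [')'])))
      (PySem.Chars.slice (PySem.Chars.strip value.toList) (some 1) (some (-1)))).trans ?_
    cases parseNumberB (PySem.Chars.slice (PySem.Chars.strip value.toList) (some 1) (some (-1))) <;> rfl
  · rw [Bool.not_eq_true] at hacc
    rw [hacc]
    simp only [Bool.not_false, Bool.and_true, Bool.false_eq_true, if_false]
    by_cases hpar : (PySem.Chars.isIn ['('] (PySem.Chars.strip value.toList) ||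
        PySem.Chars.isIn [')'] (PySem.Chars.strip value.toList)) = true
    · rw [if_pos hpar, if_pos hpar]
    · rw [if_neg hpar, if_neg hpar]
      exact tail1 value String.ofList _
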